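-- pv_equiv track=rewrite | github.com/jasondk/clangaroo | mcp_clangd/lsp_methods.py | _extract_type_from_markdown
-- ===== SOURCE A (Python) =====
-- def _extract_type_from_markdown(markdown: str) -> str:
--     """Extract type information from markdown hover text"""
--
--     lines = markdown.split('\n')
--     for line in lines:
--         line = line.strip()
--         if line.startswith('```cpp') or line.startswith('```c'):
--             continue
--         if line.startswith('```') and not line.startswith('```cpp') and not line.startswith('```c'):
--             continue
--         if line == '```':
--             continue
--         if line and not line.startswith('#') and not line.startswith('*'):
--             # This looks like type information
--             return line
--
--     # Fallback: return first non-empty line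
--     for line in lines:
--         line = line.strip()
--         if line and not line.startswith('```') and not line.startswith('#'):
--             return line
--
--     return ""
-- ===== SOURCE B (Python) =====
-- def _extract_type_from_markdown(markdown: str) -> str:
--     """Extract type information from markdown hover text (single pass)."""
--     fallback = None
--     for line in markdown.split('\n'):
--         line = line.strip()
--         if line.startswith('```') or line.startswith('#'):
--             continue
--         if line:
--             if not line.startswith('*'):
--                 return line
--             if fallback is None:
--                 fallback = line
--     return fallback if fallback is not None else ""
-- ===== Notes on version B (the rewrite author's own statement) =====
-- stated objective: simpler
-- what changed: Replaces A's two sequential scans (primary pass, then a separate fallback pass) and its three redundant code-fence tests with one pass that records the first asterisk-prefixed line as the fallback candidate while searching for the primary line.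
import Mathlib
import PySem

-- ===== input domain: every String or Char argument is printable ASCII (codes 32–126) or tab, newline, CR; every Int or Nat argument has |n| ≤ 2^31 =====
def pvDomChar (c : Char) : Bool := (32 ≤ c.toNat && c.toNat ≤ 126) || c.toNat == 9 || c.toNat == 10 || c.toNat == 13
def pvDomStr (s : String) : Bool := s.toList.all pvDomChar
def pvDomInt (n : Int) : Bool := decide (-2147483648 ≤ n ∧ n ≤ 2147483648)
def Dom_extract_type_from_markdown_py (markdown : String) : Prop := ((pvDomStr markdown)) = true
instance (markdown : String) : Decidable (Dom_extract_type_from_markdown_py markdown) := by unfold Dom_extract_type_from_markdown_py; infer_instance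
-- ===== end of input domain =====

-- B replaces A's two sequential scans (primary, then fallback) by a single pass that records the first asterisk-prefixed line as the fallback; objective: simpler.


-- ===== PORT A =====
-- first loop of A: returns the first stripped line that is not skipped by the fence/empty/#/* tests
def pvALoop1 : List String → Option String
  | [] => none
  | l :: rest =>
    let line := PySem.Str.strip l
    if PySem.Str.startswith line "```cpp" || PySem.Str.startswith line "```c" then pvALoop1 rest
    else if PySem.Str.startswith line "```" && !PySem.Str.startswith line "```cpp" && !PySem.Str.startswith line "```c" then pvALoop1 rest
    else if line == "```" then pvALoop1 rest
    else if line ≠ "" && !PySem.Str.startswith line "#" && !PySem.Str.startswith line "*" then some line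
    else pvALoop1 rest

-- second (fallback) loop of A: first non-empty stripped line not starting with ``` or #
def pvALoop2 : List String → Option String
  | [] => none
  | l :: rest =>
    let line := PySem.Str.strip l
    if line ≠ "" && !PySem.Str.startswith line "```" && !PySem.Str.startswith line "#" then some line
    else pvALoop2 rest

def extract_type_from_markdown_py (markdown : String) : String :=
  let lines := (PySem.Str.split? markdown "\n").getD []
  match pvALoop1 lines with
  | some line => line
  | none =>
    match pvALoop2 lines with
    | some line => line
    | none => ""

-- ===== PORT B =====
-- single pass with a fallback accumulator (Source B's loop)
def pvBLoop : List String → Option String → String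
  | [], fb => match fb with | some f => f | none => ""
  | l :: rest, fb =>
    let line := PySem.Str.strip l
    if PySem.Str.startswith line "```" || PySem.Str.startswith line "#" then pvBLoop rest fb
    else if line ≠ "" then
      if !PySem.Str.startswith line "*" then line
      else match fb with
        | none => pvBLoop rest (some line)
        | some _ => pvBLoop rest fb
    else pvBLoop rest fb

def extract_type_from_markdown_py_alt (markdown : String) : String :=
  pvBLoop ((PySem.Str.split? markdown "\n").getD []) none

-- ===== PRECONDITION & SPEC =====
def Spec_extract_type_from_markdown_py (markdown : String) (out : String) : Prop := out = extract_type_from_markdown_py_alt markdown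
instance (markdown : String) (out : String) : Decidable (Spec_extract_type_from_markdown_py markdown out) := by unfold Spec_extract_type_from_markdown_py; infer_instance

-- ===== CLAIM (what is proved, stated in full; the proofs are below) =====
def Claim_equal_extract_type_from_markdown_py : Prop := ∀ (markdown : String), Dom_extract_type_from_markdown_py markdown → Spec_extract_type_from_markdown_py markdown (extract_type_from_markdown_py markdown)

-- ===== LEMMAS AND PROOFS =====

-- a prefix of a prefix: startswith at the List Char level is transitive through <+:
theorem pv_sw_trans (s p q : List Char) (hpq : q <+: p)
    (h : PySem.Chars.startswith s p = true) : PySem.Chars.startswith s q = true := by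
  rw [PySem.Chars.startswith_iff] at h ⊢
  exact hpq.trans h

-- the key invariant: one pass with accumulator fb equals (first loop, else fb, else second loop)
theorem pvBLoop_eq (ls : List String) (fb : Option String) :
    pvBLoop ls fb =
      match pvALoop1 ls with
      | some l => l
      | none => match fb with
        | some f => f
        | none => (pvALoop2 ls).getD "" := by
  induction ls generalizing fb with
  | nil => cases fb <;> simp [pvBLoop, pvALoop1, pvALoop2]
  | cons l rest ih =>
    simp only [pvBLoop, pvALoop1, pvALoop2, PySem.Str.startswith_eq]
    set line := PySem.Str.strip l with hline
    by_cases h3 : PySem.Chars.startswith line.toList ['`', '`', '`'] = true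
    · -- fence line: all three of A's skip tests collapse to this; B skips too
      by_cases hcpp : PySem.Chars.startswith line.toList ['`', '`', '`', 'c', 'p', 'p'] = true
      · simp [h3, hcpp, ih]
      · by_cases hc : PySem.Chars.startswith line.toList ['`', '`', '`', 'c'] = true
        · simp [h3, hc, ih]
        · simp [h3, hcpp, hc, ih]
    · -- not a fence line
      have hcpp : PySem.Chars.startswith line.toList ['`', '`', '`', 'c', 'p', 'p'] = false := by
        by_contra h; simp only [Bool.not_eq_false] at h
        exact h3 (pv_sw_trans _ _ _ (by decide) h)
      have hc : PySem.Chars.startswith line.toList ['`', '`', '`', 'c'] = false := by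
        by_contra h; simp only [Bool.not_eq_false] at h
        exact h3 (pv_sw_trans _ _ _ (by decide) h)
      have h4 : line ≠ "```" := by
        intro h; rw [h] at h3; exact h3 (by decide)
      by_cases hh : PySem.Chars.startswith line.toList ['#'] = true
      · -- '#' line: skipped everywhere
        simp [h3, hcpp, hc, h4, hh, ih]
      · by_cases he : line = ""
        · simp [he, ih]
        · by_cases hs : PySem.Chars.startswith line.toList ['*'] = true
          · -- asterisk line: A's first loop skips it, it is A's fallback candidate, B records it if fb empty
            cases fb with
            | none => simp [h3, hcpp, hc, h4, hh, he, hs, ih]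
            | some f => simp [h3, hcpp, hc, h4, hh, he, hs, ih]
          · -- primary line: both return it
            simp [h3, hcpp, hc, h4, hh, he, hs]

-- ===== VERDICT (by name: the statement is the Claim_ definition above) =====
theorem extract_type_from_markdown_py_spec : Claim_equal_extract_type_from_markdown_py := by
  intro markdown _
  unfold Spec_extract_type_from_markdown_py extract_type_from_markdown_py extract_type_from_markdown_py_alt
  rw [pvBLoop_eq]
  cases h1 : pvALoop1 ((PySem.Str.split? markdown "\n").getD []) with
  | some l => simp [h1]
  | none => cases h2 : pvALoop2 ((PySem.Str.split? markdown "\n").getD []) <;> simp [h1, h2]
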